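-- pv_equiv track=rewrite | github.com/cybertronai/ByteDMD | experiments/memory_management/algorithms.py | flops_strassen
-- ===== SOURCE A (Python) =====
-- def flops_strassen(N):
--     """Strassen leaf=1 FLOP count.
--
--     At each level S, performs 7 recursive multiplications of size S/2 and
--     18 matrix additions of size S/2 (each addition has (S/2)^2 element
--     operations). Recurrence: F(S) = 7 F(S/2) + 18 (S/2)^2 with F(1) = 1.
--     """
--     if N == 1:
--         return 1
--     k = N.bit_length() - 1  # log2(N)
--     n_mults = 7 ** k
--     n_adds = 0
--     branches = 1
--     s = N
--     for _ in range(k):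
--         n_adds += branches * 18 * (s // 2) ** 2
--         branches *= 7
--         s //= 2
--     return n_mults + n_adds
-- ===== SOURCE B (Python) =====
-- def flops_strassen(N):
--     if N == 1:
--         return 1
--     return 7 * flops_strassen(N // 2) + 18 * (N // 2) ** 2
-- ===== Notes on version B (the rewrite author's own statement) =====
-- stated objective: simpler
-- what changed: Replaced A's explicit bit_length/geometric-sum loop maintaining three accumulators with a direct three-line recursion on the halving structure (F(1)=1, F(N)=7*F(N//2)+18*(N//2)**2). Pre_ excludes N <= 0, where A returns a float (N=0) or a flop count for a meaningless negative size while B's recursion does not terminate.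
-- outside the precondition, e.g. on flops_strassen(0): A returns 0.14285714285714285, B raises RecursionError; on flops_strassen(-3): A returns 79, B raises RecursionError
import Mathlib
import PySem

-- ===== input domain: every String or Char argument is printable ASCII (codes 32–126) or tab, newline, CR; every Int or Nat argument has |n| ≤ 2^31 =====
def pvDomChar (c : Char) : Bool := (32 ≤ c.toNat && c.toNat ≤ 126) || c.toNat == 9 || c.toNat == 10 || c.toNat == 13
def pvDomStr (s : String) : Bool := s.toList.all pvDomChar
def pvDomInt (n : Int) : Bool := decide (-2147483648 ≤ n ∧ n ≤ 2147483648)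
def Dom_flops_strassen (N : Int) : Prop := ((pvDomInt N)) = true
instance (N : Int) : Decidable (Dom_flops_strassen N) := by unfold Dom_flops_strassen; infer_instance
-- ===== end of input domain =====

-- B replaces A's bit_length/loop summation with the direct three-line recursion of the stated
-- recurrence (simpler; same O(log N) cost). Equivalence is claimed for N ≥ 1.

-- ===== PORT A =====
-- one loop iteration: state (n_adds, branches, s)
def strassenStep (st : Int × Int × Int) : Int × Int × Int :=
  (st.1 + st.2.1 * 18 * (PySem.Int.floordiv st.2.2 2) ^ 2,
   st.2.1 * 7,
   PySem.Int.floordiv st.2.2 2)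

def flops_strassen (N : Int) : Int :=
  if N = 1 then 1
  else
    let k : Nat := PySem.Int.bitLength N - 1   -- Python: N.bit_length() - 1 (for N = 0 Python returns a float; outside Pre_)
    let n_mults : Int := 7 ^ k
    let fin := (List.range k).foldl (fun st _ => strassenStep st) (0, 1, N)
    n_mults + fin.1

-- ===== PORT B =====
def flops_strassen_alt (N : Int) : Int :=
  if N = 1 then 1
  else if N ≤ 0 then 0   -- totality guard only: the Python recursion does not terminate here (outside Pre_)
  else 7 * flops_strassen_alt (PySem.Int.floordiv N 2) + 18 * (PySem.Int.floordiv N 2) ^ 2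
termination_by N.toNat
decreasing_by
  rw [PySem.Int.floordiv_eq_ediv_of_pos (by omega)]
  omega

-- ===== PRECONDITION & SPEC =====
-- Pre_ excludes N ≤ 0: at N = 0 A returns a float (not an int), and for negative N A returns a
-- meaningless flop count for a nonsensical matrix size while B's recursion does not terminate.
def Pre_flops_strassen (N : Int) : Prop := 1 ≤ N
instance (N : Int) : Decidable (Pre_flops_strassen N) := by unfold Pre_flops_strassen; infer_instance
def pvWitness_flops_strassen : Int := (4)

def Spec_flops_strassen (N : Int) (out : Int) : Prop := out = flops_strassen_alt N
instance (N : Int) (out : Int) : Decidable (Spec_flops_strassen N out) := by unfold Spec_flops_strassen; infer_instance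

-- ===== CLAIM (what is proved, stated in full; the proofs are below) =====
def Claim_equal_flops_strassen : Prop := ∀ (N : Int), Dom_flops_strassen N → Pre_flops_strassen N → Spec_flops_strassen N (flops_strassen N)

-- ===== LEMMAS AND PROOFS =====

-- a for-loop whose body ignores the index is an iterate
theorem foldl_const_iterate {α β : Type} (g : α → α) (init : α) (l : List β) :
    l.foldl (fun st _ => g st) init = g^[l.length] init := by
  induction l generalizing init with
  | nil => rfl
  | cons x t ih => simpa [Function.iterate_succ_apply] using ih (g init)

-- the accumulated n_adds is affine in (n_adds, branches)
theorem step_fst_affine (k : Nat) : ∀ (a b s : Int),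
    (strassenStep^[k] (a, b, s)).1 = a + b * (strassenStep^[k] (0, 1, s)).1 := by
  induction k with
  | zero => intro a b s; simp
  | succ k ih =>
      intro a b s
      rw [Function.iterate_succ_apply, Function.iterate_succ_apply]
      show (strassenStep^[k] (strassenStep (a, b, s))).1
        = a + b * (strassenStep^[k] (strassenStep (0, 1, s))).1
      simp only [strassenStep]
      rw [ih, ih (0 + 1 * 18 * (PySem.Int.floordiv s 2) ^ 2)]
      ring

-- closed characterisation of A (valid down to N = 1)
theorem A_val (n : Int) (h : 1 ≤ n) :
    flops_strassen n
      = 7 ^ (PySem.Int.bitLength n - 1)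
        + (strassenStep^[PySem.Int.bitLength n - 1] (0, 1, n)).1 := by
  by_cases h1 : n = 1
  · subst h1; decide
  · simp only [flops_strassen, if_neg h1, foldl_const_iterate, List.length_range]

-- every positive int has positive bit length
theorem bitLength_pos (n : Int) (h : 1 ≤ n) : 1 ≤ PySem.Int.bitLength n := by
  rw [PySem.Int.bitLength_of_pos (by omega)]; omega

-- A satisfies the recurrence F(n) = 7 F(n//2) + 18 (n//2)^2 for n ≥ 2
theorem A_rec (n : Int) (h : 2 ≤ n) :
    flops_strassen n
      = 7 * flops_strassen (PySem.Int.floordiv n 2)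
        + 18 * (PySem.Int.floordiv n 2) ^ 2 := by
  have hd : 1 ≤ PySem.Int.floordiv n 2 := by
    rw [PySem.Int.floordiv_eq_ediv_of_pos (by omega)]; omega
  have hbl : PySem.Int.bitLength n = PySem.Int.bitLength (PySem.Int.floordiv n 2) + 1 :=
    PySem.Int.bitLength_of_pos (by omega)
  have hbd := bitLength_pos _ hd
  obtain ⟨k, hk⟩ : ∃ k, PySem.Int.bitLength (PySem.Int.floordiv n 2) = k + 1 :=
    ⟨PySem.Int.bitLength (PySem.Int.floordiv n 2) - 1, by omega⟩
  rw [A_val n (by omega), A_val _ hd, hbl, hk]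
  simp only [Nat.add_sub_cancel]
  rw [Function.iterate_succ_apply]
  show 7 ^ (k + 1) + (strassenStep^[k] (strassenStep (0, 1, n))).1 = _
  simp only [strassenStep]
  rw [step_fst_affine]
  ring

-- A = B on all N ≥ 1, by well-founded recursion on N
theorem A_eq_B (n : Int) (h : 1 ≤ n) : flops_strassen n = flops_strassen_alt n := by
  by_cases h1 : n = 1
  · subst h1
    rw [flops_strassen_alt]
    decide
  · have h2 : 2 ≤ n := by omega
    have hd : 1 ≤ PySem.Int.floordiv n 2 := by
      rw [PySem.Int.floordiv_eq_ediv_of_pos (by omega)]; omega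
    rw [A_rec n h2, flops_strassen_alt, if_neg h1, if_neg (by omega : ¬ n ≤ 0),
        A_eq_B (PySem.Int.floordiv n 2) hd]
termination_by n.toNat
decreasing_by
  rw [PySem.Int.floordiv_eq_ediv_of_pos (by omega)]
  omega

-- ===== VERDICT (by name: the statement is the Claim_ definition above) =====
theorem flops_strassen_spec : Claim_equal_flops_strassen := by
  intro N _ hpre
  exact A_eq_B N hpre
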